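-- pv_equiv track=rewrite | github.com/alexander-belikov/article_analysis | article_analysis/parse_ent.py | apply_vector_set_operators
-- ===== SOURCE A (Python) =====
-- from functools import reduce
-- from operator import and_
--
-- def apply_vector_set_operators(set_vector, operator_vector):
--     def ig_right(a, _):
--         return a
--     superset = set.union(*set_vector)
--
--     def andnot(a, b):
--         return and_(a, superset - b)
--     conversion_dict = {'ig': ig_right, 'and': and_, 'andnot': andnot}
--     if len(set(operator_vector) - set(conversion_dict.keys())) > 0:
--         return set()
--     else:
--         operator_vector = [conversion_dict[x] for x in operator_vector] + [ig_right]
--         set_vector = [superset] + set_vector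
--         combo = list(zip(set_vector, operator_vector))
--         r_set, _ = reduce(lambda a, b: (a[1](a[0], b[0]), b[1]), combo)
--         return r_set
-- ===== SOURCE B (Python) =====
-- def apply_vector_set_operators(set_vector, operator_vector):
--     # one pass per element: keep x iff every non-'ig' operator's condition holds
--     superset = set.union(*set_vector)
--     if not set(operator_vector) <= {'ig', 'and', 'andnot'}:
--         return set()
--     pairs = list(zip(operator_vector, set_vector))
--     return {x for x in superset
--             if all((x in s) == (op == 'and')
--                    for op, s in pairs if op != 'ig')}
-- ===== Notes on version B (the rewrite author's own statement) =====
-- stated objective: alternative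
-- what changed: Replaces the reduce over zipped (set, operator-function) pairs with a carried operator and a conversion dict by a single element-wise filter of the superset: since intersection and the andnot difference commute, x survives iff every non-'ig' paired operator's membership condition holds.
import Mathlib
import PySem

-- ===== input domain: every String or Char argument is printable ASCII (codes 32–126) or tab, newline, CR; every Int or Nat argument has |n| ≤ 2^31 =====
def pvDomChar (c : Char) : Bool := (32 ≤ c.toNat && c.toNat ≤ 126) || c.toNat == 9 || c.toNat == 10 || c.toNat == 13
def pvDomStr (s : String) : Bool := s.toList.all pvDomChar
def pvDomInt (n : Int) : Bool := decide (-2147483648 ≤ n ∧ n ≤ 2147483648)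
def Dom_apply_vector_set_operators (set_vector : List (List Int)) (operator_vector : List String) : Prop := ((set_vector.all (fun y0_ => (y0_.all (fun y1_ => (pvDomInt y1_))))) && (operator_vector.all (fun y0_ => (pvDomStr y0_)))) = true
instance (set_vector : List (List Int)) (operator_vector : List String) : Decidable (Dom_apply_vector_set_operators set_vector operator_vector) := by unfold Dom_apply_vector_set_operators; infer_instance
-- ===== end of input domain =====

-- B replaces A's reduce-with-carried-operator fold by one element-wise filter of the superset (alternative decomposition, same cost).

-- ===== PORT A =====
def pvIgRight : List Int → List Int → List Int := fun a _ => a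
def pvAndOp : List Int → List Int → List Int := fun a b => PySem.Set.inter a b
def pvAndnot (superset : List Int) : List Int → List Int → List Int :=
  fun a b => PySem.Set.inter a (PySem.Set.diff superset b)
-- conversion_dict lookup (keys are the three literals, looked up with known keys)
def pvConv (superset : List Int) (x : String) : List Int → List Int → List Int :=
  if x == "ig" then pvIgRight else if x == "and" then pvAndOp else pvAndnot superset
def pvReduceStep (a b : (List Int) × (List Int → List Int → List Int)) :
    (List Int) × (List Int → List Int → List Int) := (a.2 a.1 b.1, b.2)

def apply_vector_set_operators (set_vector : List (List Int)) (operator_vector : List String) : List Int :=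
  match set_vector with
  | [] => []  -- Python: set.union(*[]) raises TypeError; excluded by Pre_
  | s0 :: rest =>
    let superset := rest.foldl (fun a b => PySem.Set.union a b) (PySem.Set.ofList s0)
    if (PySem.Set.diff (PySem.Set.ofList operator_vector) ["ig", "and", "andnot"]).length > 0 then
      []
    else
      let opfuns := operator_vector.map (pvConv superset) ++ [pvIgRight]
      let combo := (superset :: set_vector).zip opfuns
      match combo with
      | [] => []  -- unreachable (combo is nonempty); Python's reduce would raise on []
      | c0 :: ctail => (ctail.foldl pvReduceStep c0).1

-- ===== PORT B =====
-- the per-pair condition of B's comprehension: non-'ig' pairs demand (x in s) == (op == 'and')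
def pvKeep (x : Int) (p : String × List Int) : Bool :=
  if p.1 == "ig" then true else (p.2.contains x == (p.1 == "and"))

def apply_vector_set_operators_alt (set_vector : List (List Int)) (operator_vector : List String) : List Int :=
  match set_vector with
  | [] => []  -- Python: set.union(*[]) raises TypeError; excluded by Pre_
  | s0 :: rest =>
    let superset := rest.foldl (fun a b => PySem.Set.union a b) (PySem.Set.ofList s0)
    if PySem.Set.issubset (PySem.Set.ofList operator_vector) ["ig", "and", "andnot"] then
      superset.filter (fun x => (operator_vector.zip set_vector).all (pvKeep x))
    else []

-- ===== PRECONDITION & SPEC =====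
-- Pre_ excludes only the empty set_vector, on which set.union(*set_vector) raises TypeError (in A and in B alike).
def Pre_apply_vector_set_operators (set_vector : List (List Int)) (operator_vector : List String) : Prop :=
  set_vector ≠ []
instance (set_vector : List (List Int)) (operator_vector : List String) : Decidable (Pre_apply_vector_set_operators set_vector operator_vector) := by unfold Pre_apply_vector_set_operators; infer_instance
def pvWitness_apply_vector_set_operators : List (List Int) × List String := ([[1, 2], [2, 3]], ["and"])
def Spec_apply_vector_set_operators (set_vector : List (List Int)) (operator_vector : List String) (out : List Int) : Prop := out = apply_vector_set_operators_alt set_vector operator_vector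
instance (set_vector : List (List Int)) (operator_vector : List String) (out : List Int) : Decidable (Spec_apply_vector_set_operators set_vector operator_vector out) := by unfold Spec_apply_vector_set_operators; infer_instance

-- ===== CLAIM (what is proved, stated in full; the proofs are below) =====
def Claim_equal_apply_vector_set_operators : Prop := ∀ (set_vector : List (List Int)) (operator_vector : List String), Dom_apply_vector_set_operators set_vector operator_vector → Pre_apply_vector_set_operators set_vector operator_vector → Spec_apply_vector_set_operators set_vector operator_vector (apply_vector_set_operators set_vector operator_vector)

-- ===== LEMMAS AND PROOFS =====

-- the shape of A's reduce: the carried function is applied to the accumulator and the next set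
def pvRunA (r : List Int) (f : List Int → List Int → List Int) :
    List ((List Int) × (List Int → List Int → List Int)) → List Int
  | [] => r
  | (s, f') :: t => pvRunA (f r s) f' t

lemma foldl_reduceStep_eq_runA (l : List ((List Int) × (List Int → List Int → List Int)))
    (r : List Int) (f : List Int → List Int → List Int) :
    (l.foldl pvReduceStep (r, f)).1 = pvRunA r f l := by
  induction l generalizing r f with
  | nil => rfl
  | cons b t ih => cases b with | mk s f' => simpa [pvReduceStep, pvRunA] using ih (f r s) f'

-- one A-step on a filtered superset is one more conjunct of B's predicate
lemma conv_filter (S s : List Int) (f : String) (p : Int → Bool) :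
    pvConv S f (S.filter p) s = S.filter (fun x => p x && pvKeep x (f, s)) := by
  unfold pvConv pvKeep pvIgRight pvAndOp pvAndnot
  by_cases hig : f == "ig"
  · simp [hig]
  · by_cases hand : f == "and"
    · simp only [hig, hand, Bool.false_eq_true, if_false, if_true,
        PySem.Set.inter, PySem.Set.contains, List.filter_filter]
      exact List.filter_congr (fun x _ => by simp [Bool.and_comm])
    · simp only [hig, hand, Bool.false_eq_true, if_false,
        PySem.Set.inter, PySem.Set.diff, PySem.Set.contains, List.filter_filter]
      refine List.filter_congr (fun x hx => ?_)
      simp [hx, Bool.and_comm]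

-- main invariant: A's remaining reduce over a filtered superset is B's filter over the zipped pairs
lemma runA_filter (S : List Int) (sv : List (List Int)) (ops : List String) (f : String) (p : Int → Bool) :
    pvRunA (S.filter p) (pvConv S f) (sv.zip (ops.map (pvConv S) ++ [pvIgRight]))
      = S.filter (fun x => p x && ((f :: ops).zip sv).all (pvKeep x)) := by
  induction sv generalizing ops f p with
  | nil => simp [pvRunA]
  | cons s sv' ih =>
    cases ops with
    | nil =>
      simp only [List.map_nil, List.nil_append, List.zip_cons_cons, List.zip_nil_right]
      show pvRunA (pvConv S f (S.filter p) s) pvIgRight [] = _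
      rw [conv_filter]
      simp [pvRunA]
    | cons o ops' =>
      simp only [List.map_cons, List.cons_append, List.zip_cons_cons]
      show pvRunA (pvConv S f (S.filter p) s) (pvConv S o) (sv'.zip (ops'.map (pvConv S) ++ [pvIgRight])) = _
      rw [conv_filter, ih]
      refine List.filter_congr ?_
      intro x _
      simp [Bool.and_assoc]

-- A's "invalid operator" test is the negation of B's issubset test
lemma check_iff (ops : List String) :
    ((PySem.Set.diff (PySem.Set.ofList ops) ["ig", "and", "andnot"]).length > 0)
      ↔ ¬ (PySem.Set.issubset (PySem.Set.ofList ops) ["ig", "and", "andnot"] = true) := by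
  rw [PySem.Set.issubset_iff]
  simp only [PySem.Set.diff, gt_iff_lt, List.length_pos_iff_exists_mem, List.mem_filter,
    Bool.not_eq_eq_eq_not, Bool.not_true, not_forall]
  constructor
  · rintro ⟨x, hxS, hxc⟩
    refine ⟨x, hxS, fun hm => ?_⟩
    simp at hm hxc
    rcases hm with h | h | h <;> simp [h] at hxc
  · rintro ⟨x, hxS, hxm⟩
    refine ⟨x, hxS, ?_⟩
    cases hc : PySem.Set.contains ["ig", "and", "andnot"] x with
    | true => exact absurd ((PySem.Set.contains_iff _ _).1 hc) hxm
    | false => rfl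

-- ===== VERDICT (by name: the statement is the Claim_ definition above) =====
theorem apply_vector_set_operators_spec : Claim_equal_apply_vector_set_operators := by
  intro sv ops _ hpre
  unfold Spec_apply_vector_set_operators
  cases sv with
  | nil => exact absurd rfl hpre
  | cons s0 rest =>
    simp only [apply_vector_set_operators, apply_vector_set_operators_alt]
    by_cases hsub : PySem.Set.issubset (PySem.Set.ofList ops) ["ig", "and", "andnot"] = true
    · rw [if_neg (fun h => (check_iff ops).1 h hsub), if_pos hsub]
      cases ops with
      | nil =>
        simp [List.filter_true]
      | cons o ops' =>
        simp only [List.map_cons, List.cons_append, List.zip_cons_cons]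
        rw [foldl_reduceStep_eq_runA]
        have h := runA_filter (List.foldl (fun a b => PySem.Set.union a b) (PySem.Set.ofList s0) rest)
          (s0 :: rest) ops' o (fun _ => true)
        rw [List.filter_true] at h
        rw [h]
        exact List.filter_congr (fun x _ => by simp)
    · rw [if_pos (by rw [check_iff]; exact hsub), if_neg hsub]
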